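-- pv_equiv track=rewrite | github.com/IIyCbKA/SummerPractice | src/algorithms.py | FindRightNums
-- ===== SOURCE A (Python) =====
-- def FindRightNums(num: str, limit: int, isIncreasing: bool | None) -> int:
--     numGreaterLimit: bool = (int(num) > limit)
--     numIsStrictlyIncreasing: bool = (
--         len(num) > 1 and int(num[-1]) <= int(num[-2])) if isIncreasing \
--         else len(num) > 1 and int(num[-1]) >= int(num[-2])
--     numIsBig: bool = len(num) > 10
--     anyCheck: bool = numGreaterLimit or numIsStrictlyIncreasing or numIsBig
--
--     if anyCheck:
--         count: int = 0
--
--     else: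
--         count: int = 1
--         if isIncreasing or isIncreasing is None:
--             for nextDigit in range(int(num[-1]), 10):
--                 count += FindRightNums(num + str(nextDigit), limit, True)
--         if not isIncreasing or isIncreasing is None:
--             for nextDigit in range(0, int(num[-1])):
--                 count += FindRightNums(num + str(nextDigit), limit, False)
--
--     return count
-- ===== SOURCE B (Python) =====
-- def FindRightNums(num: str, limit: int, isIncreasing: bool | None) -> int:
--     total = 0
--     stack = [(num, isIncreasing)]
--     while stack:
--         cur, flag = stack.pop()
--         numGreaterLimit = (int(cur) > limit)
--         numIsStrictlyIncreasing = (
--             len(cur) > 1 and int(cur[-1]) <= int(cur[-2])) if flag \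
--             else len(cur) > 1 and int(cur[-1]) >= int(cur[-2])
--         if numGreaterLimit or numIsStrictlyIncreasing or len(cur) > 10:
--             continue
--         total += 1
--         last = int(cur[-1])
--         if flag or flag is None:
--             for d in range(last, 10):
--                 stack.append((cur + str(d), True))
--         if not flag or flag is None:
--             for d in range(0, last):
--                 stack.append((cur + str(d), False))
--     return total
-- ===== Notes on version B (the rewrite author's own statement) =====
-- stated objective: alternative
-- what changed: A's tree recursion (each call returns 1 plus the recursive counts of its child numbers) is replaced by an iterative depth-first search: an explicit stack of (num, flag) frames and a single running total, popping a frame, applying the same three checks, counting it and pushing its child frames.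
import Mathlib
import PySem

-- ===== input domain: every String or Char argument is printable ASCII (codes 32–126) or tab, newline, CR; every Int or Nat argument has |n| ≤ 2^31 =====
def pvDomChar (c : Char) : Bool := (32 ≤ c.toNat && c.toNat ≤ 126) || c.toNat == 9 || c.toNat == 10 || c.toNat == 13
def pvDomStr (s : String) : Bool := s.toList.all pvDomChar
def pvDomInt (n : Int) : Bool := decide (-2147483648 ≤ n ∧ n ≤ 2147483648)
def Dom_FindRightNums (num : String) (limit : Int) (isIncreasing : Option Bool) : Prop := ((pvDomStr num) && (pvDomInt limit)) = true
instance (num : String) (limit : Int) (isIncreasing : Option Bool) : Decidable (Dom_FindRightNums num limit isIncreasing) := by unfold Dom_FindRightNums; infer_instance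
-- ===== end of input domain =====

-- B replaces A's tree recursion by an explicit iterative DFS over a stack of (num, flag) frames with
-- one running total (objective: alternative decomposition, same asymptotic cost).

-- shared plumbing for Python's int() calls (both Pythons perform the identical conversions):
-- int(s) on the whole string; none = ValueError (excluded by Pre_), 0 is a dummy value there
def pvIntOf (cs : List Char) : Int := (PySem.Int.ofChars? cs).getD 0

-- int(s[i]) on ONE character: exact on the ASCII domain (a digit character parses to its value,
-- any other ASCII character raises ValueError — excluded by Pre_, 0 is a dummy value there)
def pvDigitAt (cs : List Char) (i : Int) : Int :=
  match PySem.List.pyGet? cs i with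
  | some c => if PySem.Chars.isdigit c then (c.toNat : Int) - 48 else 0
  | none => 0

-- ===== PORT A =====
-- literal transliteration of A's tree recursion (over the string's character list).
-- fuel is only a structural totality guard: each call appends ≥ 1 character and stops past 10,
-- so fuel 12 is never exhausted (pvGoA_irrel below) — it changes no computation.
def pvGoA (fuel : Nat) (num : List Char) (limit : Int) (isIncreasing : Option Bool) : Int :=
  match fuel with
  | 0 => 0
  | fuel + 1 =>
    if pvIntOf num > limit
        ∨ (if isIncreasing = some true
           then 1 < num.length ∧ pvDigitAt num (-1) ≤ pvDigitAt num (-2)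
           else 1 < num.length ∧ pvDigitAt num (-2) ≤ pvDigitAt num (-1))
        ∨ 10 < num.length then
      0
    else
      let count : Int := 1
      let count := if isIncreasing = some true ∨ isIncreasing = none then
          (PySem.List.pyRange (pvDigitAt num (-1)) 10 1).foldl
            (fun c d => c + pvGoA fuel (num ++ PySem.Int.toChars d) limit (some true)) count
        else count
      let count := if isIncreasing = some false ∨ isIncreasing = none then
          (PySem.List.pyRange 0 (pvDigitAt num (-1)) 1).foldl
            (fun c d => c + pvGoA fuel (num ++ PySem.Int.toChars d) limit (some false)) count
        else count
      count

def FindRightNums (num : String) (limit : Int) (isIncreasing : Option Bool) : Int :=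
  pvGoA 12 num.toList limit isIncreasing

-- ===== PORT B =====
-- the child frames pushed for one counted frame (the two 'stack.append' loops of B)
def pvKids1 (cur : List Char) (flag : Option Bool) : List (List Char × Option Bool) :=
  if flag = some true ∨ flag = none then
    (PySem.List.pyRange (pvDigitAt cur (-1)) 10 1).map
      (fun d => (cur ++ PySem.Int.toChars d, some true))
  else []

def pvKids2 (cur : List Char) (flag : Option Bool) : List (List Char × Option Bool) :=
  if flag = some false ∨ flag = none then
    (PySem.List.pyRange 0 (pvDigitAt cur (-1)) 1).map
      (fun d => (cur ++ PySem.Int.toChars d, some false))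
  else []

-- literal transliteration of B: pop a frame, run the same three checks, count it, push its children.
-- fuel is only a structural totality guard: 11^12 bounds the loop's iteration count for every
-- input (pvDfsB_eq below), so it is never exhausted — it changes no computation.
def pvDfsB (limit : Int) (fuel : Nat) (stack : List (List Char × Option Bool)) (total : Int) : Int :=
  match fuel, stack with
  | _, [] => total
  | 0, _ :: _ => total
  | fuel + 1, (cur, flag) :: rest =>
    if pvIntOf cur > limit
        ∨ (if flag = some true
           then 1 < cur.length ∧ pvDigitAt cur (-1) ≤ pvDigitAt cur (-2)
           else 1 < cur.length ∧ pvDigitAt cur (-2) ≤ pvDigitAt cur (-1))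
        ∨ 10 < cur.length then
      pvDfsB limit fuel rest total
    else
      -- stack.pop() is LIFO: the frames appended last are processed first
      pvDfsB limit fuel ((pvKids2 cur flag).reverse ++ ((pvKids1 cur flag).reverse ++ rest)) (total + 1)

def FindRightNums_alt (num : String) (limit : Int) (isIncreasing : Option Bool) : Int :=
  pvDfsB limit (11 ^ 12) [(num.toList, isIncreasing)] 0

-- ===== PRECONDITION & SPEC =====
-- Pre_ excludes exactly the inputs on which A raises ValueError: num that int() cannot parse,
-- or (when len(num) > 1) a last or second-to-last character that is not a digit.
def Pre_FindRightNums (num : String) (limit : Int) (isIncreasing : Option Bool) : Prop :=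
  (PySem.Int.ofChars? num.toList).isSome = true ∧
  (1 < num.toList.length →
    PySem.Chars.isdigit (PySem.List.pyGetD num.toList (-1) ' ') = true ∧
    PySem.Chars.isdigit (PySem.List.pyGetD num.toList (-2) ' ') = true)
instance (num : String) (limit : Int) (isIncreasing : Option Bool) : Decidable (Pre_FindRightNums num limit isIncreasing) := by unfold Pre_FindRightNums; infer_instance

def pvWitness_FindRightNums : String × Int × Option Bool := ("9", 500, none)

def Spec_FindRightNums (num : String) (limit : Int) (isIncreasing : Option Bool) (out : Int) : Prop := out = FindRightNums_alt num limit isIncreasing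
instance (num : String) (limit : Int) (isIncreasing : Option Bool) (out : Int) : Decidable (Spec_FindRightNums num limit isIncreasing out) := by unfold Spec_FindRightNums; infer_instance

-- ===== CLAIM (what is proved, stated in full; the proofs are below) =====
def Claim_equal_FindRightNums : Prop := ∀ (num : String) (limit : Int) (isIncreasing : Option Bool), Dom_FindRightNums num limit isIncreasing → Pre_FindRightNums num limit isIncreasing → Spec_FindRightNums num limit isIncreasing (FindRightNums num limit isIncreasing)

-- ===== LEMMAS AND PROOFS =====

lemma pvDigitAt_bounds (cs : List Char) (i : Int) :
    0 ≤ pvDigitAt cs i ∧ pvDigitAt cs i ≤ 9 := by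
  unfold pvDigitAt
  cases h : PySem.List.pyGet? cs i with
  | none => simp
  | some c =>
    by_cases hd : PySem.Chars.isdigit c = true
    · have hb : 48 ≤ c.toNat ∧ c.toNat ≤ 57 := by
        revert hd
        simp only [PySem.Chars.isdigit, Bool.and_eq_true, decide_eq_true_eq, Char.le_def,
          UInt32.le_iff_toNat_le, Char.toNat]
        intro h; exact h
      simp [hd]; omega
    · simp [hd]

lemma pvToChars_len (d : Int) (h0 : 0 ≤ d) (h9 : d < 10) :
    (PySem.Int.toChars d).length = 1 := by interval_cases d <;> decide

-- A's value at non-zero fuel, loop-free: the two foldl accumulations written as sums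
lemma pvGoA_eq (fuel : Nat) (num : List Char) (limit : Int) (flag : Option Bool) :
    pvGoA (fuel + 1) num limit flag =
      if pvIntOf num > limit
          ∨ (if flag = some true
             then 1 < num.length ∧ pvDigitAt num (-1) ≤ pvDigitAt num (-2)
             else 1 < num.length ∧ pvDigitAt num (-2) ≤ pvDigitAt num (-1))
          ∨ 10 < num.length then 0
      else
        1 + (if flag = some true ∨ flag = none then
              ((PySem.List.pyRange (pvDigitAt num (-1)) 10 1).map
                (fun d => pvGoA fuel (num ++ PySem.Int.toChars d) limit (some true))).sum
             else 0)
          + (if flag = some false ∨ flag = none then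
              ((PySem.List.pyRange 0 (pvDigitAt num (-1)) 1).map
                (fun d => pvGoA fuel (num ++ PySem.Int.toChars d) limit (some false))).sum
             else 0) := by
  rw [pvGoA]
  split_ifs <;> simp only [PySem.List.foldl_add] <;> ring

-- any two sufficient fuels compute the same value (so fuel 12 is the recursion's true value)
lemma pvGoA_irrel (f1 f2 : Nat) (num : List Char) (limit : Int) (flag : Option Bool)
    (h1 : 12 - num.length ≤ f1) (h2 : 12 - num.length ≤ f2) :
    pvGoA f1 num limit flag = pvGoA f2 num limit flag := by
  induction f1 generalizing f2 num flag with
  | zero =>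
    have hlen : 12 ≤ num.length := by omega
    cases f2 with
    | zero => rfl
    | succ g =>
      rw [pvGoA_eq]
      simp only [if_pos (show pvIntOf num > limit
        ∨ (if flag = some true
           then 1 < num.length ∧ pvDigitAt num (-1) ≤ pvDigitAt num (-2)
           else 1 < num.length ∧ pvDigitAt num (-2) ≤ pvDigitAt num (-1))
        ∨ 10 < num.length from Or.inr (Or.inr (by omega)))]
      rfl
  | succ f ih =>
    cases f2 with
    | zero =>
      have hlen : 12 ≤ num.length := by omega
      rw [pvGoA_eq]
      simp only [if_pos (show pvIntOf num > limit
        ∨ (if flag = some true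
           then 1 < num.length ∧ pvDigitAt num (-1) ≤ pvDigitAt num (-2)
           else 1 < num.length ∧ pvDigitAt num (-2) ≤ pvDigitAt num (-1))
        ∨ 10 < num.length from Or.inr (Or.inr (by omega)))]
      rfl
    | succ g =>
      rw [pvGoA_eq, pvGoA_eq]
      by_cases hb : pvIntOf num > limit
          ∨ (if flag = some true
             then 1 < num.length ∧ pvDigitAt num (-1) ≤ pvDigitAt num (-2)
             else 1 < num.length ∧ pvDigitAt num (-2) ≤ pvDigitAt num (-1))
          ∨ 10 < num.length
      · simp only [if_pos hb]
      · simp only [if_neg hb]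
        have hlen : num.length ≤ 10 := by
          by_contra hc; exact hb (Or.inr (Or.inr (by omega)))
        have hm := pvDigitAt_bounds num (-1)
        have hkid : ∀ (b : Bool) (d : Int), 0 ≤ d → d < 10 →
            pvGoA f (num ++ PySem.Int.toChars d) limit (some b)
              = pvGoA g (num ++ PySem.Int.toChars d) limit (some b) := by
          intro b d hd0 hd9
          have hl : (num ++ PySem.Int.toChars d).length = num.length + 1 := by
            rw [List.length_append, pvToChars_len d hd0 hd9]
          exact ih _ _ _ (by omega) (by omega)
        have e1 : (if flag = some true ∨ flag = none then
              ((PySem.List.pyRange (pvDigitAt num (-1)) 10 1).map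
                (fun d => pvGoA f (num ++ PySem.Int.toChars d) limit (some true))).sum
            else 0)
            = (if flag = some true ∨ flag = none then
              ((PySem.List.pyRange (pvDigitAt num (-1)) 10 1).map
                (fun d => pvGoA g (num ++ PySem.Int.toChars d) limit (some true))).sum
            else 0) := by
          split_ifs with hfl
          · refine congrArg List.sum (List.map_congr_left fun d hd => ?_)
            have := PySem.List.mem_pyRange_one.mp hd
            exact hkid true d (by omega) (by omega)
          · rfl
        have e2 : (if flag = some false ∨ flag = none then
              ((PySem.List.pyRange 0 (pvDigitAt num (-1)) 1).map
                (fun d => pvGoA f (num ++ PySem.Int.toChars d) limit (some false))).sum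
            else 0)
            = (if flag = some false ∨ flag = none then
              ((PySem.List.pyRange 0 (pvDigitAt num (-1)) 1).map
                (fun d => pvGoA g (num ++ PySem.Int.toChars d) limit (some false))).sum
            else 0) := by
          split_ifs with hfl
          · refine congrArg List.sum (List.map_congr_left fun d hd => ?_)
            have := PySem.List.mem_pyRange_one.mp hd
            exact hkid false d (by omega) (by omega)
          · rfl
        rw [e1, e2]

-- potential of a DFS frame: an upper bound on the loop iterations it can still cause
def pvPot (f : List Char × Option Bool) : Nat := 11 ^ (12 - f.1.length)

lemma pvKids_sum_lt (cur : List Char) (flag : Option Bool) (hL : cur.length ≤ 10) :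
    ((pvKids2 cur flag).map pvPot).sum + ((pvKids1 cur flag).map pvPot).sum
      < pvPot (cur, flag) := by
  have hm := pvDigitAt_bounds cur (-1)
  have hP : 0 < 11 ^ (11 - cur.length) := pow_pos (by norm_num) _
  have hpot : pvPot (cur, flag) = 11 ^ (11 - cur.length) * 11 := by
    unfold pvPot
    have h12 : 12 - cur.length = (11 - cur.length) + 1 := by omega
    simp [h12, pow_succ]
  have key : ∀ (b : Option Bool) (a c : Int), 0 ≤ a → c ≤ 10 →
      (((PySem.List.pyRange a c 1).map
          (fun d => (cur ++ PySem.Int.toChars d, b))).map pvPot).sum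
        = (c - a).toNat * 11 ^ (11 - cur.length) := by
    intro b a c ha hc
    rw [List.map_map]
    rw [List.map_congr_left (fun d hd => ?_) (g := fun _ => 11 ^ (11 - cur.length))]
    · rw [List.map_const', List.sum_replicate, smul_eq_mul,
        PySem.List.length_pyRange_one]
    · have hdb := PySem.List.mem_pyRange_one.mp hd
      have h1 : (PySem.Int.toChars d).length = 1 := pvToChars_len _ (by omega) (by omega)
      simp only [Function.comp_apply, pvPot, List.length_append, h1]
      congr 1
      omega
  rcases flag with _ | b
  · rw [pvKids1, pvKids2,
      if_pos (show (none : Option Bool) = some false ∨ (none : Option Bool) = none from Or.inr rfl),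
      if_pos (show (none : Option Bool) = some true ∨ (none : Option Bool) = none from Or.inr rfl),
      key (some true) (pvDigitAt cur (-1)) 10 hm.1 (by norm_num),
      key (some false) 0 (pvDigitAt cur (-1)) (by norm_num) (by omega), hpot]
    have h10 : (pvDigitAt cur (-1) - 0).toNat + (10 - pvDigitAt cur (-1)).toNat = 10 := by
      omega
    nlinarith [h10, hP]
  · cases b
    · rw [pvKids1, pvKids2,
        if_pos (show (some false : Option Bool) = some false ∨ (some false : Option Bool) = none from Or.inl rfl),
        if_neg (show ¬((some false : Option Bool) = some true ∨ (some false : Option Bool) = none) by simp),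
        key (some false) 0 (pvDigitAt cur (-1)) (by norm_num) (by omega), hpot]
      simp only [List.map_nil, List.sum_nil, add_zero]
      have h9 : (pvDigitAt cur (-1) - 0).toNat ≤ 9 := by omega
      nlinarith [h9, hP]
    · rw [pvKids1, pvKids2,
        if_neg (show ¬((some true : Option Bool) = some false ∨ (some true : Option Bool) = none) by simp),
        if_pos (show (some true : Option Bool) = some true ∨ (some true : Option Bool) = none from Or.inl rfl),
        key (some true) (pvDigitAt cur (-1)) 10 hm.1 (by norm_num), hpot]
      simp only [List.map_nil, List.sum_nil, zero_add]
      have h10 : (10 - pvDigitAt cur (-1)).toNat ≤ 10 := by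
        omega
      nlinarith [h10, hP]

lemma pvPot_pos (f : List Char × Option Bool) : 0 < pvPot f := pow_pos (by norm_num) _

-- the DFS loop invariant: with enough fuel, the running total plus the A-values (at their own
-- sufficient fuel 12) of all pending frames is the answer
lemma pvDfsB_eq (limit : Int) (fuel : Nat) (stack : List (List Char × Option Bool)) (total : Int)
    (hf : (stack.map pvPot).sum ≤ fuel) :
    pvDfsB limit fuel stack total
      = total + (stack.map (fun f => pvGoA 12 f.1 limit f.2)).sum := by
  induction fuel generalizing stack total with
  | zero =>
    cases stack with
    | nil => simp [pvDfsB]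
    | cons f rest =>
      exfalso
      have := pvPot_pos f
      simp only [List.map_cons, List.sum_cons] at hf
      omega
  | succ fuel ih =>
    cases stack with
    | nil => simp [pvDfsB]
    | cons fr rest =>
      obtain ⟨cur, flag⟩ := fr
      simp only [List.map_cons, List.sum_cons] at hf ⊢
      rw [pvDfsB]
      have h12 : pvGoA 12 cur limit flag = pvGoA (11 + 1) cur limit flag := rfl
      by_cases hb : pvIntOf cur > limit
          ∨ (if flag = some true
             then 1 < cur.length ∧ pvDigitAt cur (-1) ≤ pvDigitAt cur (-2)
             else 1 < cur.length ∧ pvDigitAt cur (-2) ≤ pvDigitAt cur (-1))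
          ∨ 10 < cur.length
      · simp only [if_pos hb]
        rw [ih rest total (by have := pvPot_pos (cur, flag); omega)]
        rw [h12, pvGoA_eq]
        simp only [if_pos hb]
        omega
      · simp only [if_neg hb]
        have hlen : cur.length ≤ 10 := by
          by_contra hc; exact hb (Or.inr (Or.inr (by omega)))
        have hks := pvKids_sum_lt cur flag hlen
        rw [ih _ (total + 1) ?hfuel]
        case hfuel =>
          simp only [List.map_append, List.sum_append, List.map_reverse, List.sum_reverse]
          omega
        rw [h12, pvGoA_eq]
        simp only [if_neg hb]
        simp only [List.map_append, List.sum_append, List.map_reverse, List.sum_reverse]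
        have hm := pvDigitAt_bounds cur (-1)
        have hkid : ∀ (b : Bool) (d : Int), 0 ≤ d → d < 10 →
            pvGoA 12 (cur ++ PySem.Int.toChars d) limit (some b)
              = pvGoA 11 (cur ++ PySem.Int.toChars d) limit (some b) := by
          intro b d hd0 hd9
          have hl : (cur ++ PySem.Int.toChars d).length = cur.length + 1 := by
            rw [List.length_append, pvToChars_len d hd0 hd9]
          exact pvGoA_irrel 12 11 _ limit (some b) (by omega) (by omega)
        have e1 : ((pvKids1 cur flag).map (fun f => pvGoA 12 f.1 limit f.2)).sum
            = (if flag = some true ∨ flag = none then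
              ((PySem.List.pyRange (pvDigitAt cur (-1)) 10 1).map
                (fun d => pvGoA 11 (cur ++ PySem.Int.toChars d) limit (some true))).sum
            else 0) := by
          rw [pvKids1]
          split_ifs with hfl
          · rw [List.map_map]
            refine congrArg List.sum (List.map_congr_left fun d hd => ?_)
            have := PySem.List.mem_pyRange_one.mp hd
            exact hkid true d (by omega) (by omega)
          · rfl
        have e2 : ((pvKids2 cur flag).map (fun f => pvGoA 12 f.1 limit f.2)).sum
            = (if flag = some false ∨ flag = none then
              ((PySem.List.pyRange 0 (pvDigitAt cur (-1)) 1).map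
                (fun d => pvGoA 11 (cur ++ PySem.Int.toChars d) limit (some false))).sum
            else 0) := by
          rw [pvKids2]
          split_ifs with hfl
          · rw [List.map_map]
            refine congrArg List.sum (List.map_congr_left fun d hd => ?_)
            have := PySem.List.mem_pyRange_one.mp hd
            exact hkid false d (by omega) (by omega)
          · rfl
        rw [e1, e2]
        ring

-- ===== VERDICT (by name: the statement is the Claim_ definition above) =====
theorem FindRightNums_spec : Claim_equal_FindRightNums := by
  intro num limit flag _ _
  unfold Spec_FindRightNums FindRightNums FindRightNums_alt
  rw [pvDfsB_eq limit (11 ^ 12) [(num.toList, flag)] 0 ?hf]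
  case hf =>
    simp only [List.map_cons, List.map_nil, List.sum_cons, List.sum_nil, add_zero, pvPot]
    exact Nat.pow_le_pow_right (by norm_num) (by omega)
  simp
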